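-- pv_equiv track=rewrite | github.com/ykai16/diHMM | bed_writer.py | _create_annotation_ranges
-- ===== SOURCE A (Python) =====
-- def _create_annotation_ranges(annotations, bin_or_domain):
--
-- 	t_idx = bin_or_domain
--
-- 	ranges = []
--
-- 	current_state = annotations[0][t_idx]
--
-- 	#start of current range, inclusive
-- 	current_range_start = 0
--
-- 	#end of current range, exclusive
-- 	current_range_end = 0
--
-- 	for (idx, state) in enumerate(annotations):
--
-- 		if (state[t_idx] == current_state):
--
-- 			current_range_end += 1
-- 		else:
--
-- 			ranges.append((current_state, current_range_start, current_range_end))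
--
-- 			current_range_start = current_range_end
-- 			current_range_end += 1
-- 			current_state = state[t_idx]
--
-- 	ranges.append((current_state, current_range_start, current_range_end))
--
-- 	return ranges
-- ===== SOURCE B (Python) =====
-- def _create_annotation_ranges(annotations, bin_or_domain):
--     # Two-pointer run scan: for each run start i, advance j to the end of the
--     # run of equal states, emit (state, i, j), continue from j.
--     ranges = []
--     n = len(annotations)
--     i = 0
--     while i < n:
--         s = annotations[i][bin_or_domain]
--         j = i + 1
--         while j < n and annotations[j][bin_or_domain] == s:
--             j += 1
--         ranges.append((s, i, j))
--         i = j
--     return ranges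
-- ===== Notes on version B (the rewrite author's own statement) =====
-- stated objective: alternative
-- what changed: Replaces A's single-pass state machine (current_state/current_range_start/current_range_end mutated per element, appending on state change) with a two-pointer run scan: an outer loop picks each run start i and an inner loop advances j to the run's end, emitting (state, i, j) per run.
import Mathlib
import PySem

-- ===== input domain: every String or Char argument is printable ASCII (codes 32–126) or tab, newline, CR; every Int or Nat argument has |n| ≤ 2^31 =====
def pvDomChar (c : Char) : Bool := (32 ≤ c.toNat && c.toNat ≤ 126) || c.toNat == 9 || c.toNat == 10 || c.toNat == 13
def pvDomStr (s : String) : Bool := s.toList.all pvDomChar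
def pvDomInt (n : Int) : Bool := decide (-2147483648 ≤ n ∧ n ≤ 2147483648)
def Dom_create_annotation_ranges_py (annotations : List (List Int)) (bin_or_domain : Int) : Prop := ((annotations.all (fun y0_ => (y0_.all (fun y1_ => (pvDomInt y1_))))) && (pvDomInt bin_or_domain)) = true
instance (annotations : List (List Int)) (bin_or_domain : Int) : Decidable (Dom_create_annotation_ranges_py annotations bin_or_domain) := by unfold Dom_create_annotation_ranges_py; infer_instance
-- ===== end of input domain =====

-- B replaces A's running state machine with a two-pointer run scan (outer loop per
-- run, inner scan to the run's end); same O(n) cost, different decomposition.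


-- row[t] as Python computes it; the .getD 0 default is reached only outside Pre_
-- (where Python raises IndexError).
def pvVal (t : Int) (row : List Int) : Int := (PySem.List.pyGet? row t).getD 0

-- ===== PORT A =====
-- A's loop body, named: acc = (ranges, current_state, current_range_start, current_range_end),
-- branches in the source order
def pvStepA (t : Int) (acc : List (Int × Int × Int) × Int × Int × Int) (state : List Int) :
    List (Int × Int × Int) × Int × Int × Int :=
  if pvVal t state == acc.2.1 then
    (acc.1, acc.2.1, acc.2.2.1, acc.2.2.2 + 1)
  else
    (acc.1 ++ [(acc.2.1, acc.2.2.1, acc.2.2.2)], pvVal t state, acc.2.2.2, acc.2.2.2 + 1)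

-- the enumerate index idx is bound but unused, exactly as in the Python
def create_annotation_ranges_py (annotations : List (List Int)) (bin_or_domain : Int) : List (Int × Int × Int) :=
  let t_idx := bin_or_domain
  let current_state := pvVal t_idx ((PySem.List.pyGet? annotations 0).getD [])
  let st := (PySem.List.enumerate annotations 0).foldl
    (fun acc p => pvStepA t_idx acc p.2) ([], current_state, 0, 0)
  st.1 ++ [(st.2.1, st.2.2.1, st.2.2.2)]

-- ===== PORT B =====
-- inner while loop: advance j to the end of the run of value s starting before j
def altScan (annotations : List (List Int)) (t s : Int) (j : Nat) : Nat :=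
  if j < annotations.length then
    if pvVal t (annotations.getD j []) == s then altScan annotations t s (j + 1) else j
  else j
termination_by annotations.length - j

theorem le_altScan (annotations : List (List Int)) (t s : Int) (j : Nat) :
    j ≤ altScan annotations t s j := by
  unfold altScan
  split
  · split
    · exact Nat.le_trans (Nat.le_succ j) (le_altScan annotations t s (j + 1))
    · exact Nat.le_refl j
  · exact Nat.le_refl j
termination_by annotations.length - j

-- outer while loop: one output triple per run, starting at index i
def altLoop (annotations : List (List Int)) (t : Int) (i : Nat) : List (Int × Int × Int) :=
  if h : i < annotations.length then
    let s := pvVal t (annotations.getD i [])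
    let j := altScan annotations t s (i + 1)
    (s, (i : Int), (j : Int)) :: altLoop annotations t j
  else []
termination_by annotations.length - i
decreasing_by
  have hj := le_altScan annotations t (pvVal t (annotations.getD i [])) (i + 1)
  omega

def create_annotation_ranges_py_alt (annotations : List (List Int)) (bin_or_domain : Int) : List (Int × Int × Int) :=
  altLoop annotations bin_or_domain 0

-- ===== PRECONDITION & SPEC =====
-- Pre_ excludes exactly the inputs where the Python A raises: empty annotations
-- (IndexError on annotations[0]) and rows for which bin_or_domain is not a valid
-- Python index (IndexError on state[t_idx]).
def Pre_create_annotation_ranges_py (annotations : List (List Int)) (bin_or_domain : Int) : Prop :=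
  annotations ≠ [] ∧ ∀ row ∈ annotations, -(row.length : Int) ≤ bin_or_domain ∧ bin_or_domain < row.length
instance (annotations : List (List Int)) (bin_or_domain : Int) : Decidable (Pre_create_annotation_ranges_py annotations bin_or_domain) := by unfold Pre_create_annotation_ranges_py; infer_instance

def pvWitness_create_annotation_ranges_py : List (List Int) × Int := ([[1], [1], [2]], 0)

def Spec_create_annotation_ranges_py (annotations : List (List Int)) (bin_or_domain : Int) (out : List (Int × Int × Int)) : Prop := out = create_annotation_ranges_py_alt annotations bin_or_domain
instance (annotations : List (List Int)) (bin_or_domain : Int) (out : List (Int × Int × Int)) : Decidable (Spec_create_annotation_ranges_py annotations bin_or_domain out) := by unfold Spec_create_annotation_ranges_py; infer_instance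

-- ===== CLAIM (what is proved, stated in full; the proofs are below) =====
def Claim_equal_create_annotation_ranges_py : Prop := ∀ (annotations : List (List Int)) (bin_or_domain : Int), Dom_create_annotation_ranges_py annotations bin_or_domain → Pre_create_annotation_ranges_py annotations bin_or_domain → Spec_create_annotation_ranges_py annotations bin_or_domain (create_annotation_ranges_py annotations bin_or_domain)


-- ===== LEMMAS AND PROOFS =====

-- A's state machine, abstracted over the list of looked-up values
def pvGo (vs : List Int) (cs rs re : Int) : List (Int × Int × Int) :=
  match vs with
  | [] => [(cs, rs, re)]
  | v :: vs' => if v == cs then pvGo vs' cs rs (re + 1) else (cs, rs, re) :: pvGo vs' v re (re + 1)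

-- B's run decomposition, abstracted likewise
def pvBgo (vs : List Int) (off : Int) : List (Int × Int × Int) :=
  match vs with
  | [] => []
  | v :: vs' => pvGo vs' v off (off + 1)

-- the unused enumerate index can be dropped from A's fold
theorem foldl_enum_ignore (t : Int) :
    ∀ (l : List (List Int)) (s : Int) (a : List (Int × Int × Int) × Int × Int × Int),
      (PySem.List.enumerate l s).foldl (fun acc p => pvStepA t acc p.2) a = l.foldl (pvStepA t) a := by
  intro l
  induction l with
  | nil => intro s a; simp [PySem.List.enumerate_nil]
  | cons x xs ih => intro s a; simp only [PySem.List.enumerate_cons, List.foldl_cons, ih]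

theorem foldA_go (t : Int) :
    ∀ (rows : List (List Int)) (acc : List (Int × Int × Int)) (cs rs re : Int),
      (rows.foldl (pvStepA t) (acc, cs, rs, re)).1
        ++ [((rows.foldl (pvStepA t) (acc, cs, rs, re)).2.1,
             (rows.foldl (pvStepA t) (acc, cs, rs, re)).2.2.1,
             (rows.foldl (pvStepA t) (acc, cs, rs, re)).2.2.2)]
      = acc ++ pvGo (rows.map (pvVal t)) cs rs re := by
  intro rows
  induction rows with
  | nil => intro acc cs rs re; simp [pvGo]
  | cons row rest ih =>
    intro acc cs rs re
    by_cases h : pvVal t row == cs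
    · simp [pvStepA, h, ih, pvGo]
    · simp [pvStepA, h, ih, pvGo]

-- altScan lands at j plus the length of the run of value s in the looked-up values after j
theorem altScan_spec (annotations : List (List Int)) (t s : Int) :
    ∀ (j : Nat),
      altScan annotations t s j
        = j + (((annotations.map (pvVal t)).drop j).takeWhile (fun v => v == s)).length := by
  intro j
  unfold altScan
  split
  · rename_i hj
    have hdrop : (annotations.map (pvVal t)).drop j
        = pvVal t (annotations.getD j []) :: (annotations.map (pvVal t)).drop (j + 1) := by
      have hj' : j < (annotations.map (pvVal t)).length := by simpa using hj
      rw [List.drop_eq_getElem_cons hj']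
      simp [List.getD, List.getElem?_eq_getElem hj]
    rw [hdrop]
    split
    · rename_i heq
      rw [List.takeWhile_cons_of_pos (p := fun v => v == s) heq, altScan_spec annotations t s (j + 1)]
      simp only [List.length_cons]
      omega
    · rename_i hne
      rw [List.takeWhile_cons_of_neg (p := fun v => v == s) (by simpa using hne)]
      simp
  · rename_i hj
    have : (annotations.map (pvVal t)).drop j = [] := by
      apply List.drop_eq_nil_of_le; simp; omega
    simp [this]
termination_by j => annotations.length - j

-- the state machine emits its current run then proceeds as the run decomposition
theorem go_scan : ∀ (vs : List Int) (cs rs re : Int),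
    pvGo vs cs rs re
      = (cs, rs, re + ((vs.takeWhile (fun v => v == cs)).length : Int))
        :: pvBgo (vs.drop (vs.takeWhile (fun v => v == cs)).length) (re + ((vs.takeWhile (fun v => v == cs)).length : Int)) := by
  intro vs
  induction vs with
  | nil => intro cs rs re; simp [pvGo, pvBgo]
  | cons v vs' ih =>
    intro cs rs re
    by_cases h : v == cs
    · rw [List.takeWhile_cons_of_pos (p := fun v => v == cs) h]
      simp only [pvGo, h, if_true, ih, List.length_cons, List.drop_succ_cons,
        Nat.cast_add, Nat.cast_one]
      have he : re + (((vs'.takeWhile (fun v => v == cs)).length : Int) + 1)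
          = re + 1 + ((vs'.takeWhile (fun v => v == cs)).length : Int) := by ring
      rw [he]
    · rw [List.takeWhile_cons_of_neg (p := fun v => v == cs) (by simpa using h)]
      simp only [pvGo, h, List.length_nil, Nat.cast_zero, add_zero, List.drop_zero]
      rfl

theorem altLoop_bgo (annotations : List (List Int)) (t : Int) :
    ∀ (i : Nat), altLoop annotations t i = pvBgo ((annotations.map (pvVal t)).drop i) (i : Int) := by
  intro i
  rw [altLoop]
  split
  · rename_i hi
    have hdrop : (annotations.map (pvVal t)).drop i
        = pvVal t (annotations.getD i []) :: (annotations.map (pvVal t)).drop (i + 1) := by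
      have hi' : i < (annotations.map (pvVal t)).length := by simpa using hi
      rw [List.drop_eq_getElem_cons hi']
      simp [List.getD, List.getElem?_eq_getElem hi]
    show (pvVal t (annotations.getD i []), (i : Int),
          ((altScan annotations t (pvVal t (annotations.getD i [])) (i + 1) : Nat) : Int))
        :: altLoop annotations t (altScan annotations t (pvVal t (annotations.getD i [])) (i + 1))
      = pvBgo ((annotations.map (pvVal t)).drop i) (i : Int)
    set s := pvVal t (annotations.getD i []) with hs
    rw [hdrop]
    set c := (((annotations.map (pvVal t)).drop (i + 1)).takeWhile (fun v => v == s)).length with hc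
    have hscan : altScan annotations t s (i + 1) = i + 1 + c := altScan_spec annotations t s (i + 1)
    have hrec := altLoop_bgo annotations t (altScan annotations t s (i + 1))
    rw [hscan] at hrec
    rw [hscan, hrec]
    simp only [pvBgo]
    rw [go_scan]
    have hdd : (annotations.map (pvVal t)).drop (i + 1 + c)
        = ((annotations.map (pvVal t)).drop (i + 1)).drop c := by
      rw [List.drop_drop]
    rw [hdd, ← hc, show ((i + 1 + c : Nat) : Int) = (i : Int) + 1 + (c : Int) from by push_cast; ring]
    rfl
  · rename_i hi
    have : (annotations.map (pvVal t)).drop i = [] := by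
      apply List.drop_eq_nil_of_le; simp; omega
    simp [this, pvBgo]
termination_by i => annotations.length - i
decreasing_by
  have hj := le_altScan annotations t (pvVal t (annotations.getD i [])) (i + 1)
  omega

-- ===== VERDICT (by name: the statement is the Claim_ definition above) =====
theorem create_annotation_ranges_py_spec : Claim_equal_create_annotation_ranges_py := by
  intro annotations bin_or_domain _hdom hpre
  unfold Spec_create_annotation_ranges_py
  obtain ⟨hne, _⟩ := hpre
  obtain ⟨row0, rest, rfl⟩ := List.exists_cons_of_ne_nil hne
  unfold create_annotation_ranges_py create_annotation_ranges_py_alt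
  simp only [foldl_enum_ignore]
  rw [foldA_go, altLoop_bgo]
  simp only [List.drop_zero, List.map_cons, pvBgo, List.nil_append,
    PySem.List.pyGet?_zero_cons, Option.getD_some, pvGo, beq_self_eq_true, if_true,
    Nat.cast_zero, zero_add]
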